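-- pv_equiv track=rewrite | github.com/GuilhermeAquino92/seofrogold | seofrog/parsers/base.py | calculate_problem_severity
-- ===== SOURCE A (Python) =====
-- from typing import Dict, Any, Optional, List, Union
--
-- def calculate_problem_severity(problems: List[str]) -> str:
--     """
--     Calcula severidade geral baseada na lista de problemas
--
--     Args:
--         problems: Lista de chaves de problemas (ex: ['sem_h1', 'headings_escondidas'])
--
--     Returns:
--         str: Nível de severidade geral
--     """
--     if not problems:
--         return SeverityLevel.BAIXA
--
--     severities = []
--     for problem in problems:
--         severity = PROBLEM_SEVERITY_MAP.get(problem, SeverityLevel.BAIXA)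
--         severities.append(severity)
--
--     # Retorna a severidade mais alta encontrada
--     if SeverityLevel.CRITICA in severities:
--         return SeverityLevel.CRITICA
--     elif SeverityLevel.ALTA in severities:
--         return SeverityLevel.ALTA
--     elif SeverityLevel.MEDIA in severities:
--         return SeverityLevel.MEDIA
--     else:
--         return SeverityLevel.BAIXA
--
-- class SeverityLevel:
--     """Níveis de severidade para problemas SEO"""
--     BAIXA = 'baixa'
--     MEDIA = 'média'
--     ALTA = 'alta'
--     CRITICA = 'crítica'
--
-- PROBLEM_SEVERITY_MAP = {
--     # Problemas críticos
--     'sem_h1': SeverityLevel.CRITICA,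
--     'multiplos_h1': SeverityLevel.CRITICA,
--     'h1_vazio': SeverityLevel.CRITICA,
--     'headings_escondidas': SeverityLevel.CRITICA,
--     'title_ausente': SeverityLevel.CRITICA,
--     'meta_description_ausente': SeverityLevel.CRITICA,
--     'thin_content_critico': SeverityLevel.CRITICA,
--     'imagens_sem_src': SeverityLevel.CRITICA,
--
--     # Problemas altos
--     'h1_muito_curto': SeverityLevel.ALTA,
--     'h1_muito_longo': SeverityLevel.ALTA,
--     'headings_vazias': SeverityLevel.ALTA,
--     'estrutura_hierarquica_invalida': SeverityLevel.ALTA,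
--     'title_muito_longo': SeverityLevel.ALTA,
--     'canonical_ausente': SeverityLevel.ALTA,
--     'thin_content': SeverityLevel.ALTA,
--     'qualidade_conteudo_baixa': SeverityLevel.ALTA,
--     'imagens_sem_alt': SeverityLevel.ALTA,
--     'imagens_problemas_tecnicos': SeverityLevel.ALTA,
--     'links_problemas_seo': SeverityLevel.ALTA,
--
--     # Problemas médios
--     'sem_h2': SeverityLevel.MEDIA,
--     'title_muito_curto': SeverityLevel.MEDIA,
--     'meta_description_muito_longa': SeverityLevel.MEDIA,
--     'canonical_cross_domain': SeverityLevel.MEDIA,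
--     'content_muito_longo': SeverityLevel.MEDIA,
--     'estrutura_conteudo_ruim': SeverityLevel.MEDIA,
--     'imagens_otimizacao': SeverityLevel.MEDIA,
--     'links_qualidade_baixa': SeverityLevel.MEDIA,
--     'links_estrutura_ruim': SeverityLevel.MEDIA,
--
--     # Problemas baixos
--     'densidade_headings_baixa': SeverityLevel.BAIXA,
--     'meta_keywords_ausente': SeverityLevel.BAIXA,
--     'title_sem_brand': SeverityLevel.BAIXA,
-- }
-- ===== SOURCE B (Python) =====
-- from typing import List
--
-- # Keys grouped by tier (no per-key severity strings needed; map keys whose value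
-- # is 'baixa' behave exactly like unknown keys).
-- _CRITICAL = frozenset({
--     'sem_h1', 'multiplos_h1', 'h1_vazio', 'headings_escondidas',
--     'title_ausente', 'meta_description_ausente', 'thin_content_critico',
--     'imagens_sem_src',
-- })
-- _HIGH = frozenset({
--     'h1_muito_curto', 'h1_muito_longo', 'headings_vazias',
--     'estrutura_hierarquica_invalida', 'title_muito_longo', 'canonical_ausente',
--     'thin_content', 'qualidade_conteudo_baixa', 'imagens_sem_alt',
--     'imagens_problemas_tecnicos', 'links_problemas_seo',
-- })
-- _MEDIUM = frozenset({
--     'sem_h2', 'title_muito_curto', 'meta_description_muito_longa',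
--     'canonical_cross_domain', 'content_muito_longo', 'estrutura_conteudo_ruim',
--     'imagens_otimizacao', 'links_qualidade_baixa', 'links_estrutura_ruim',
-- })
--
--
-- def calculate_problem_severity(problems: List[str]) -> str:
--     best = 'baixa'
--     for p in problems:
--         if p in _CRITICAL:
--             return 'crítica'  # nothing can beat this: stop early
--         if p in _HIGH:
--             best = 'alta'
--         elif best == 'baixa' and p in _MEDIUM:
--             best = 'média'
--     return best
-- ===== Notes on version B (the rewrite author's own statement) =====
-- stated objective: alternative
-- what changed: Replaces the severity map lookup, intermediate severities list and three cascaded membership scans by per-tier key sets, a single pass keeping the best tier seen, and an early return as soon as a critical key is found.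
import Mathlib
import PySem

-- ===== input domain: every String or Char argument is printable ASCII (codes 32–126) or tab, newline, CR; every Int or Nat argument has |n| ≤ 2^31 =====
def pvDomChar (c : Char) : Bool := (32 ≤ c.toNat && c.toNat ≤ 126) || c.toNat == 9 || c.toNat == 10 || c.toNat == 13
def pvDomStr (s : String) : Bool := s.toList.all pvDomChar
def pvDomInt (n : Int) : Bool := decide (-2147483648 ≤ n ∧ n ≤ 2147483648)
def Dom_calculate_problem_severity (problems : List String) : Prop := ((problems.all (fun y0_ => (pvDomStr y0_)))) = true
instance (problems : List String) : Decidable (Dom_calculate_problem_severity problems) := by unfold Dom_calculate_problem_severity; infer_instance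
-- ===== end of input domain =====

-- B replaces A's severity-map lookup, intermediate severities list and three cascaded
-- membership scans by per-tier key sets with a single early-exit pass; same return value.


-- ===== PORT A =====
-- the module constant PROBLEM_SEVERITY_MAP (A's data structure)
def pvSevMap : PySem.Dict String String := ⟨[
  ("sem_h1", "crítica"), ("multiplos_h1", "crítica"), ("h1_vazio", "crítica"),
  ("headings_escondidas", "crítica"), ("title_ausente", "crítica"),
  ("meta_description_ausente", "crítica"), ("thin_content_critico", "crítica"),
  ("imagens_sem_src", "crítica"),
  ("h1_muito_curto", "alta"), ("h1_muito_longo", "alta"), ("headings_vazias", "alta"),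
  ("estrutura_hierarquica_invalida", "alta"), ("title_muito_longo", "alta"),
  ("canonical_ausente", "alta"), ("thin_content", "alta"),
  ("qualidade_conteudo_baixa", "alta"), ("imagens_sem_alt", "alta"),
  ("imagens_problemas_tecnicos", "alta"), ("links_problemas_seo", "alta"),
  ("sem_h2", "média"), ("title_muito_curto", "média"),
  ("meta_description_muito_longa", "média"), ("canonical_cross_domain", "média"),
  ("content_muito_longo", "média"), ("estrutura_conteudo_ruim", "média"),
  ("imagens_otimizacao", "média"), ("links_qualidade_baixa", "média"),
  ("links_estrutura_ruim", "média"),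
  ("densidade_headings_baixa", "baixa"), ("meta_keywords_ausente", "baixa"),
  ("title_sem_brand", "baixa")]⟩

def calculate_problem_severity (problems : List String) : String :=
  if problems = [] then "baixa"
  else
    -- severities = []; for problem in problems: severities.append(MAP.get(problem, BAIXA))
    let severities := problems.foldl (fun acc p => acc ++ [pvSevMap.getD p "baixa"]) []
    if "crítica" ∈ severities then "crítica"
    else if "alta" ∈ severities then "alta"
    else if "média" ∈ severities then "média"
    else "baixa"

-- ===== PORT B =====
-- B's data structure: the problem keys grouped by tier (frozensets of string
-- literals in Source B; as sets of distinct strings, a distinct-element list is exact)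
def pvCritKeys : List String :=
  ["sem_h1", "multiplos_h1", "h1_vazio", "headings_escondidas",
   "title_ausente", "meta_description_ausente", "thin_content_critico",
   "imagens_sem_src"]
def pvHighKeys : List String :=
  ["h1_muito_curto", "h1_muito_longo", "headings_vazias",
   "estrutura_hierarquica_invalida", "title_muito_longo", "canonical_ausente",
   "thin_content", "qualidade_conteudo_baixa", "imagens_sem_alt",
   "imagens_problemas_tecnicos", "links_problemas_seo"]
def pvMediumKeys : List String :=
  ["sem_h2", "title_muito_curto", "meta_description_muito_longa",
   "canonical_cross_domain", "content_muito_longo", "estrutura_conteudo_ruim",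
   "imagens_otimizacao", "links_qualidade_baixa", "links_estrutura_ruim"]

-- Source B's loop with its early return, as structural recursion on the list
def pvBestGo : List String → String → String
  | [], best => best
  | p :: rest, best =>
      if pvCritKeys.contains p then "crítica"
      else if pvHighKeys.contains p then pvBestGo rest "alta"
      else if best == "baixa" && pvMediumKeys.contains p then pvBestGo rest "média"
      else pvBestGo rest best

def calculate_problem_severity_alt (problems : List String) : String :=
  pvBestGo problems "baixa"

-- ===== PRECONDITION & SPEC =====
def Spec_calculate_problem_severity (problems : List String) (out : String) : Prop := out = calculate_problem_severity_alt problems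
instance (problems : List String) (out : String) : Decidable (Spec_calculate_problem_severity problems out) := by unfold Spec_calculate_problem_severity; infer_instance

-- ===== CLAIM (what is proved, stated in full; the proofs are below) =====
def Claim_equal_calculate_problem_severity : Prop := ∀ (problems : List String), Dom_calculate_problem_severity problems → Spec_calculate_problem_severity problems (calculate_problem_severity problems)

-- ===== LEMMAS AND PROOFS =====

-- the shared lookup MAP.get(p, 'baixa')
def pvF (p : String) : String := pvSevMap.getD p "baixa"

set_option maxRecDepth 8000 in
lemma pvF_of_crit (p : String) (h : p ∈ pvCritKeys) : pvF p = "crítica" := by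
  simp only [pvCritKeys, List.mem_cons, List.not_mem_nil, or_false] at h
  rcases h with rfl | rfl | rfl | rfl | rfl | rfl | rfl | rfl <;> rfl

set_option maxRecDepth 8000 in
lemma pvF_of_high (p : String) (h : p ∈ pvHighKeys) : pvF p = "alta" := by
  simp only [pvHighKeys, List.mem_cons, List.not_mem_nil, or_false] at h
  rcases h with rfl | rfl | rfl | rfl | rfl | rfl | rfl | rfl | rfl | rfl | rfl <;> rfl

set_option maxRecDepth 8000 in
lemma pvF_of_medium (p : String) (h : p ∈ pvMediumKeys) : pvF p = "média" := by
  simp only [pvMediumKeys, List.mem_cons, List.not_mem_nil, or_false] at h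
  rcases h with rfl | rfl | rfl | rfl | rfl | rfl | rfl | rfl | rfl <;> rfl

set_option maxRecDepth 8000 in
lemma pvF_default (p : String) (hc : p ∉ pvCritKeys) (hh : p ∉ pvHighKeys)
    (hm : p ∉ pvMediumKeys) : pvF p = "baixa" := by
  by_cases hk : p ∈ pvSevMap.keys
  · simp only [pvSevMap, PySem.Dict.keys_mk, List.map_cons, List.map_nil,
      List.mem_cons, List.not_mem_nil, or_false] at hk
    simp only [pvCritKeys, List.mem_cons, List.not_mem_nil, or_false, not_or] at hc
    simp only [pvHighKeys, List.mem_cons, List.not_mem_nil, or_false, not_or] at hh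
    simp only [pvMediumKeys, List.mem_cons, List.not_mem_nil, or_false, not_or] at hm
    rcases hk with rfl | rfl | rfl | rfl | rfl | rfl | rfl | rfl | rfl | rfl | rfl | rfl |
      rfl | rfl | rfl | rfl | rfl | rfl | rfl | rfl | rfl | rfl | rfl | rfl | rfl | rfl |
      rfl | rfl | rfl | rfl | rfl <;> first | rfl | simp_all
  · have hco : pvSevMap.contains p = false := by
      rw [PySem.Dict.contains_eq_decide_mem_keys]
      simp [hk]
    have hn : pvSevMap.get? p = none := by
      rw [PySem.Dict.get?_eq_none_iff_not_mem_keys]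
      exact hk
    simp [pvF, PySem.Dict.getD_eq_get?_getD, hn]

-- A's dict lookup agrees with B's tier sets: each map key's value is its tier
lemma pvF_eq (p : String) : pvF p =
    (if p ∈ pvCritKeys then "crítica"
     else if p ∈ pvHighKeys then "alta"
     else if p ∈ pvMediumKeys then "média"
     else "baixa") := by
  by_cases h1 : p ∈ pvCritKeys
  · rw [if_pos h1]; exact pvF_of_crit p h1
  · rw [if_neg h1]
    by_cases h2 : p ∈ pvHighKeys
    · rw [if_pos h2]; exact pvF_of_high p h2
    · rw [if_neg h2]
      by_cases h3 : p ∈ pvMediumKeys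
      · rw [if_pos h3]; exact pvF_of_medium p h3
      · rw [if_neg h3]; exact pvF_default p h1 h2 h3

-- pointwise translation between A's looked-up severity values and B's tier sets
lemma pvF_tiers (p : String) :
    (pvF p = "crítica" ↔ p ∈ pvCritKeys) ∧
    (pvF p = "alta" ↔ (p ∉ pvCritKeys ∧ p ∈ pvHighKeys)) ∧
    (pvF p = "média" ↔ (p ∉ pvCritKeys ∧ p ∉ pvHighKeys ∧ p ∈ pvMediumKeys)) := by
  rw [pvF_eq]
  split_ifs with h1 h2 h3 <;> simp_all

lemma pvSev_eq_map (l : List String) :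
    l.foldl (fun acc p => acc ++ [pvSevMap.getD p "baixa"]) [] = l.map pvF := by
  simpa [pvF] using PySem.List.foldl_append_singleton_eq_map pvF l []

-- characterization of B's early-exit loop as three whole-list scans
lemma pvBestGo_spec (l : List String) (best : String)
    (hb : best = "baixa" ∨ best = "média" ∨ best = "alta") :
    pvBestGo l best =
      (if ∃ p ∈ l, p ∈ pvCritKeys then "crítica"
       else if best = "alta" ∨ ∃ p ∈ l, p ∈ pvHighKeys then "alta"
       else if best = "média" ∨ ∃ p ∈ l, p ∈ pvMediumKeys then "média"
       else best) := by
  induction l generalizing best with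
  | nil => rcases hb with rfl | rfl | rfl <;> rfl
  | cons x t ih =>
    simp only [pvBestGo, List.contains_eq_mem, decide_eq_true_eq, Bool.and_eq_true,
      beq_iff_eq, List.exists_mem_cons_iff]
    by_cases hc : x ∈ pvCritKeys
    · simp [hc]
    · by_cases hh : x ∈ pvHighKeys
      · simp [hc, hh, ih "alta" (by simp)]
      · by_cases hbx : best = "baixa"
        · subst hbx
          by_cases hm : x ∈ pvMediumKeys
          · simp [hc, hh, hm, ih "média" (by simp)]
          · simp [hc, hh, hm, ih "baixa" (by simp)]
        · rcases hb with h | rfl | rfl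
          · exact absurd h hbx
          · simp [hc, hh, hbx, ih "média" (by simp)]
          · simp [hc, hh, hbx, ih "alta" (by simp)]

-- ===== VERDICT (by name: the statement is the Claim_ definition above) =====
theorem calculate_problem_severity_spec : Claim_equal_calculate_problem_severity := by
  intro problems _
  show _ = _
  unfold calculate_problem_severity calculate_problem_severity_alt
  rw [pvBestGo_spec problems "baixa" (Or.inl rfl)]
  rcases problems with _ | ⟨x, t⟩
  · rfl
  set l := x :: t with hl
  rw [if_neg (by simp [hl])]
  simp only [pvSev_eq_map, List.mem_map]
  have e1 : (("baixa" : String) = "alta") = False := by simp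
  have e2 : (("baixa" : String) = "média") = False := by simp
  simp only [e1, e2, false_or]
  by_cases hcB : ∃ p ∈ l, p ∈ pvCritKeys
  · obtain ⟨p, hp, hpc⟩ := hcB
    rw [if_pos ⟨p, hp, (pvF_tiers p).1.2 hpc⟩, if_pos ⟨p, hp, hpc⟩]
  · rw [if_neg hcB]
    push Not at hcB
    rw [if_neg (fun ⟨p, hp, hpf⟩ => hcB p hp ((pvF_tiers p).1.1 hpf))]
    by_cases hhB : ∃ p ∈ l, p ∈ pvHighKeys
    · obtain ⟨p, hp, hph⟩ := hhB
      rw [if_pos ⟨p, hp, (pvF_tiers p).2.1.2 ⟨hcB p hp, hph⟩⟩, if_pos ⟨p, hp, hph⟩]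
    · rw [if_neg hhB]
      push Not at hhB
      rw [if_neg (fun ⟨p, hp, hpf⟩ => hhB p hp ((pvF_tiers p).2.1.1 hpf).2)]
      by_cases hmB : ∃ p ∈ l, p ∈ pvMediumKeys
      · obtain ⟨p, hp, hpm⟩ := hmB
        rw [if_pos ⟨p, hp, (pvF_tiers p).2.2.2 ⟨hcB p hp, hhB p hp, hpm⟩⟩,
          if_pos ⟨p, hp, hpm⟩]
      · rw [if_neg hmB]
        push Not at hmB
        rw [if_neg (fun ⟨p, hp, hpf⟩ => hmB p hp ((pvF_tiers p).2.2.1 hpf).2.2)]
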